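-- pv_equiv track=rewrite | github.com/ZigaByte/SwissDraw | strength_calculator.py | computeB
-- ===== SOURCE A (Python) =====
-- def matchCount(A, i, j):
--     count = 0
--     # Check each match
--     for m in range(len(A)):
--         if(A[m][i] != 0 and A[m][j] != 0):
--             count += 1
--     return count
--
-- def computeB (A, d):
--     teams = len(A[0])
--
--     # Generate an empty matrix to for gauss initial values
--     B = []
--     for i in range(teams):
--         b = []
--         for i in range(teams + 1):
--             b.append(0)
--         B.append(b)
--
--     # Calculate numbers in the matrix
--     for i in range(teams):
--         totalMatchesForI = 0
--         for j in range(teams):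
--             if(i != j):
--                 inc = matchCount(A, i, j)
--                 B[i][j] = matchCount(A, i, j)
--                 totalMatchesForI += inc
--         B[i][i] = -totalMatchesForI
--
--     # Calculate last column
--     for i in range(teams):
--         for m in range(len(A)):
--             if(A[m][i] != 0):
--                 B[i][len(B[0]) - 1] += -A[m][i] * d[m]
--     return B
-- ===== SOURCE B (Python) =====
-- def computeB(A, d):
--     teams = len(A[0])
--     pair = {}
--     col = {}
--     for m in range(len(A)):
--         row = A[m]
--         nz = [i for i in range(teams) if row[i] != 0]
--         for i in nz:
--             col[i] = col.get(i, 0) - row[i] * d[m]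
--             for j in nz:
--                 if j != i:
--                     pair[(i, j)] = pair.get((i, j), 0) + 1
--     return [[-sum(pair.get((i, j), 0) for j in range(teams) if j != i) if j == i
--              else pair.get((i, j), 0) for j in range(teams)] + [col.get(i, 0)]
--             for i in range(teams)]
-- ===== Notes on version B (the rewrite author's own statement) =====
-- stated objective: alternative
-- what changed: B makes a single pass over the matches, accumulating off-diagonal pair counts and last-column sums in dictionaries keyed by team (pairs), instead of A's per-pair rescans of the entire match list via matchCount.
import Mathlib
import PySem

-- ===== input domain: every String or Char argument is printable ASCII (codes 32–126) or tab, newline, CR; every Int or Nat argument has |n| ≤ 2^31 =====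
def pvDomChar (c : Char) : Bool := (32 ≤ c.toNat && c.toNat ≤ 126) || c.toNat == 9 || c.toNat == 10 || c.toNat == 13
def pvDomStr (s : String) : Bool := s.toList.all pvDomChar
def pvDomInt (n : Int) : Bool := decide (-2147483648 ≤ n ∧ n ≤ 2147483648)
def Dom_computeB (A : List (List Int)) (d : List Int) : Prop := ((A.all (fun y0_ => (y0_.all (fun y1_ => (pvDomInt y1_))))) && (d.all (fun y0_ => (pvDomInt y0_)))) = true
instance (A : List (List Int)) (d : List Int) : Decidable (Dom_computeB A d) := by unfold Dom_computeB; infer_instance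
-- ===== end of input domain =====

-- B replaces A's per-pair rescans of the whole match list by one pass over the matches that
-- increments pair/column accumulators in dictionaries (objective: alternative algorithm).

-- ===== PORT A =====
def matchCount (A : List (List Int)) (i j : Int) : Int :=
  (PySem.List.pyRange 0 (PySem.List.len A)).foldl
    (fun count m =>
      if PySem.List.pyGetD (PySem.List.pyGetD A m []) i 0 ≠ 0 ∧
         PySem.List.pyGetD (PySem.List.pyGetD A m []) j 0 ≠ 0
      then count + 1 else count) 0

-- Python `B[i][j] = v` (indices here always come from `range`, hence are ≥ 0; an
-- out-of-range write raises in Python and is excluded by Pre_computeB)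
def setE (B : List (List Int)) (i j : Int) (v : Int) : List (List Int) :=
  B.set i.toNat ((PySem.List.pyGetD B i []).set j.toNat v)

-- Python `B[i][j] += v`
def addE (B : List (List Int)) (i j : Int) (v : Int) : List (List Int) :=
  setE B i j (PySem.List.pyGetD (PySem.List.pyGetD B i []) j 0 + v)

-- first loop block of Python computeB: build the zero matrix
def computeB_zero (teams : Int) : List (List Int) :=
  (PySem.List.pyRange 0 teams).foldl
    (fun B _i => B ++ [(PySem.List.pyRange 0 (teams + 1)).foldl (fun b _i => b ++ [(0 : Int)]) []]) []

-- body of the second loop (`for i in range(teams):` of the fill phase)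
def fillStep (A : List (List Int)) (teams : Int) (B : List (List Int)) (i : Int) :
    List (List Int) :=
  let p := (PySem.List.pyRange 0 teams).foldl
    (fun (p : List (List Int) × Int) j =>
      if i ≠ j then
        let inc := matchCount A i j
        (setE p.1 i j (matchCount A i j), p.2 + inc)
      else p) (B, 0)
  setE p.1 i i (-p.2)

-- second loop block: off-diagonal match counts and the diagonal
def computeB_fill (A : List (List Int)) (teams : Int) (B0 : List (List Int)) :
    List (List Int) :=
  (PySem.List.pyRange 0 teams).foldl (fillStep A teams) B0

-- body of the third loop (`for i in range(teams):` of the last-column phase)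
def lastStep (A : List (List Int)) (d : List Int) (B : List (List Int)) (i : Int) :
    List (List Int) :=
  (PySem.List.pyRange 0 (PySem.List.len A)).foldl
    (fun B m =>
      if PySem.List.pyGetD (PySem.List.pyGetD A m []) i 0 ≠ 0 then
        addE B i (PySem.List.len (PySem.List.pyGetD B 0 []) - 1)
          (-(PySem.List.pyGetD (PySem.List.pyGetD A m []) i 0) * PySem.List.pyGetD d m 0)
      else B) B

-- third loop block: the last column
def computeB_last (A : List (List Int)) (d : List Int) (teams : Int) (B1 : List (List Int)) :
    List (List Int) :=
  (PySem.List.pyRange 0 teams).foldl (lastStep A d) B1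

def computeB (A : List (List Int)) (d : List Int) : List (List Int) :=
  let teams := PySem.List.len (PySem.List.pyGetD A 0 [])
  computeB_last A d teams (computeB_fill A teams (computeB_zero teams))

-- ===== PORT B =====
-- inner `for j in nz:` loop of B
def altPairUpd (nz : List Int) (i : Int) (p : PySem.Dict (Int × Int) Int) :
    PySem.Dict (Int × Int) Int :=
  nz.foldl (fun p j => if j ≠ i then p.insert (i, j) (p.getD (i, j) 0 + 1) else p) p

-- body of B's `for m in range(len(A)):` loop
def altStep (A : List (List Int)) (d : List Int) (teams : Int)
    (st : PySem.Dict (Int × Int) Int × PySem.Dict Int Int) (m : Int) :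
    PySem.Dict (Int × Int) Int × PySem.Dict Int Int :=
  let row := PySem.List.pyGetD A m []
  let nz := (PySem.List.pyRange 0 teams).filter
    (fun i => decide (PySem.List.pyGetD row i 0 ≠ 0))
  nz.foldl
    (fun st i =>
      let col := st.2.insert i
        (st.2.getD i 0 - PySem.List.pyGetD row i 0 * PySem.List.pyGetD d m 0)
      let pair := altPairUpd nz i st.1
      (pair, col)) st

def computeB_alt (A : List (List Int)) (d : List Int) : List (List Int) :=
  let teams := PySem.List.len (PySem.List.pyGetD A 0 [])
  let st := (PySem.List.pyRange 0 (PySem.List.len A)).foldl (altStep A d teams)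
    (PySem.Dict.empty, PySem.Dict.empty)
  (PySem.List.pyRange 0 teams).map
    (fun i =>
      ((PySem.List.pyRange 0 teams).map
        (fun j =>
          if j = i then
            -((((PySem.List.pyRange 0 teams).filter (fun j => decide (j ≠ i))).map
                (fun j => st.1.getD (i, j) 0)).sum)
          else st.1.getD (i, j) 0)) ++ [st.2.getD i 0])

-- ===== PRECONDITION & SPEC =====
-- Pre_computeB holds exactly where the Python A returns normally: A nonempty (A[0] is read),
-- every row at least `teams` long (the last-column loop reads A[m][i] for every i < teams and
-- every m), and d long enough for every match with a nonzero entry among its first `teams`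
-- columns (d[m] is read exactly for those m).
def Pre_computeB (A : List (List Int)) (d : List Int) : Prop :=
  A ≠ [] ∧ (∀ row ∈ A, (A.headD []).length ≤ row.length) ∧
  (∀ m < A.length, (∃ i < (A.headD []).length, (A.getD m []).getD i 0 ≠ 0) → m < d.length)
instance (A : List (List Int)) (d : List Int) : Decidable (Pre_computeB A d) := by
  unfold Pre_computeB; infer_instance

def pvWitness_computeB : List (List Int) × List Int := ([[1, -1], [0, 2]], [3, 4])

def Spec_computeB (A : List (List Int)) (d : List Int) (out : List (List Int)) : Prop := out = computeB_alt A d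
instance (A : List (List Int)) (d : List Int) (out : List (List Int)) : Decidable (Spec_computeB A d out) := by unfold Spec_computeB; infer_instance

-- ===== CLAIM (what is proved, stated in full; the proofs are below) =====
def Claim_equal_computeB : Prop := ∀ (A : List (List Int)) (d : List Int), Dom_computeB A d → Pre_computeB A d → Spec_computeB A d (computeB A d)

-- ===== LEMMAS AND PROOFS =====

-- entry of match m in column i
def pvVal (A : List (List Int)) (m i : Int) : Int :=
  PySem.List.pyGetD (PySem.List.pyGetD A m []) i 0

-- "column i participates in match m" as B's nz-filter sees it
abbrev pvQ (A : List (List Int)) (T : Int) (m : Nat) (i : Int) : Prop :=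
  0 ≤ i ∧ i < T ∧ pvVal A ↑m i ≠ 0

-- number of the first n matches in which both i and j participate (i ≠ j)
def pairAcc (A : List (List Int)) (T : Int) (n : Nat) (i j : Int) : Int :=
  ((List.range n).countP (fun m => decide (pvQ A T m i ∧ pvQ A T m j ∧ j ≠ i)) : Int)

-- accumulated last-column value of row i over the first n matches
def colAcc (A : List (List Int)) (d : List Int) (T : Int) (n : Nat) (i : Int) : Int :=
  ((List.range n).map
    (fun (m : Nat) => if pvQ A T m i then -(pvVal A ↑m i * PySem.List.pyGetD d ↑m 0) else 0)).sum

-- the common value of both programs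
def specMat (A : List (List Int)) (d : List Int) : List (List Int) :=
  (List.range (A.getD 0 []).length).map (fun (i : Nat) =>
    ((List.range (A.getD 0 []).length).map (fun (j : Nat) =>
      if j = i then
        -((((List.range (A.getD 0 []).length).filter (fun (j : Nat) => decide (j ≠ i))).map
            (fun (j : Nat) => pairAcc A ↑(A.getD 0 []).length A.length ↑i ↑j)).sum)
      else pairAcc A ↑(A.getD 0 []).length A.length ↑i ↑j))
    ++ [colAcc A d ↑(A.getD 0 []).length A.length ↑i])

-- ---------- small list helpers ----------

theorem pv_getD_set_self {α : Type} {l : List α} {i : Nat} (h : i < l.length) (a d : α) :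
    (l.set i a).getD i d = a := by
  simp [List.getD_eq_getElem?_getD, h]

theorem pv_getD_set_ne {α : Type} (l : List α) {i k : Nat} (h : i ≠ k) (a d : α) :
    (l.set i a).getD k d = l.getD k d := by
  simp [List.getD_eq_getElem?_getD, h]

theorem pv_set_getD_self {α : Type} {l : List α} {i : Nat} (h : i < l.length) (d : α) :
    l.set i (l.getD i d) = l := by
  rw [List.getD_eq_getElem _ _ h]; exact List.set_getElem_self h

theorem pv_foldl_append_const {α β : Type} (l : List α) (c : β) :
    ∀ acc : List β, l.foldl (fun b _ => b ++ [c]) acc = acc ++ List.replicate l.length c := by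
  induction l with
  | nil => intro acc; simp
  | cons x l ih => intro acc; simp [ih, List.replicate_succ]

theorem pv_sum_map_ite {α : Type} (p : α → Prop) [DecidablePred p] (f : α → Int) (l : List α) :
    (l.map (fun x => if p x then f x else 0)).sum
      = ((l.filter (fun x => decide (p x))).map f).sum := by
  induction l with
  | nil => rfl
  | cons x l ih => by_cases h : p x <;> simp [h, ih]

theorem pv_pyRange_nodup (T : Nat) : (PySem.List.pyRange 0 (↑T : Int)).Nodup := by
  rw [PySem.List.pyRange_zero_natCast]
  exact List.Nodup.map (fun a b h => by exact_mod_cast h) List.nodup_range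

theorem pv_mem_pyRange (T k : Nat) : ((↑k : Int) ∈ PySem.List.pyRange 0 (↑T : Int)) ↔ k < T := by
  rw [PySem.List.mem_pyRange_one]
  constructor
  · rintro ⟨_, h⟩; exact_mod_cast h
  · intro h; exact ⟨Int.natCast_nonneg k, by exact_mod_cast h⟩

-- ---------- A side: the zero matrix ----------

theorem pv_zeroMat (T : Nat) :
    computeB_zero ↑T = List.replicate T (List.replicate (T + 1) (0 : Int)) := by
  unfold computeB_zero
  have h1 : ((T : Int) + 1) = ((T + 1 : Nat) : Int) := by push_cast; ring
  rw [h1, PySem.List.pyRange_zero_natCast, PySem.List.pyRange_zero_natCast,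
      pv_foldl_append_const, pv_foldl_append_const]
  simp

-- ---------- A side: row-level folds ----------

theorem pv_rowFold_len (P : Int → Prop) [DecidablePred P] (F : Int → Int) :
    ∀ (js : List Int) (r : List Int),
      (js.foldl (fun r j => if P j then r.set j.toNat (F j) else r) r).length = r.length := by
  intro js
  induction js with
  | nil => intro r; rfl
  | cons j js ih =>
    intro r
    rw [List.foldl_cons, ih]
    by_cases h : P j <;> simp [h]

theorem pv_natFold_len (F : Nat → Int) (i : Nat) :
    ∀ (js : List Nat) (r : List Int),
      (js.foldl (fun r j => if j ≠ i then r.set j (F j) else r) r).length = r.length := by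
  intro js
  induction js with
  | nil => intro r; rfl
  | cons j js ih =>
    intro r
    rw [List.foldl_cons, ih]
    by_cases h : j ≠ i <;> simp [h]

theorem pv_rowFold_getD (F : Nat → Int) (i : Nat) :
    ∀ (n : Nat) (r : List Int), n ≤ r.length → ∀ k : Nat,
      ((List.range n).foldl (fun r j => if j ≠ i then r.set j (F j) else r) r).getD k 0
        = if k < n ∧ k ≠ i then F k else r.getD k 0 := by
  intro n
  induction n with
  | zero => intro r _ k; simp
  | succ n ih =>
    intro r hn k
    rw [List.range_succ, List.foldl_append]
    have hlen : ((List.range n).foldl (fun r j => if j ≠ i then r.set j (F j) else r) r).length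
        = r.length := pv_natFold_len F i _ r
    simp only [List.foldl_cons, List.foldl_nil]
    by_cases hni : n = i
    · rw [if_neg (by omega)]
      rw [ih r (by omega) k]
      by_cases h1 : k < n ∧ k ≠ i
      · rw [if_pos h1, if_pos ⟨by omega, h1.2⟩]
      · rw [if_neg h1, if_neg (by omega)]
    · rw [if_pos (by omega)]
      by_cases hk : k = n
      · subst hk
        rw [pv_getD_set_self (by rw [hlen]; omega)]
        rw [if_pos ⟨by omega, hni⟩]
      · rw [pv_getD_set_ne _ (by omega)]
        rw [ih r (by omega) k]
        by_cases h1 : k < n ∧ k ≠ i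
        · rw [if_pos h1, if_pos ⟨by omega, h1.2⟩]
        · rw [if_neg h1, if_neg (by omega)]

-- ---------- A side: phase-2 step as a single row replacement ----------

def tot2 (A : List (List Int)) (T i : Nat) : Int :=
  (((PySem.List.pyRange 0 ↑T).filter (fun j => decide ((↑i : Int) ≠ j))).map
    (fun j => matchCount A ↑i j)).sum

def rho2 (A : List (List Int)) (T i : Nat) (r : List Int) : List Int :=
  ((PySem.List.pyRange 0 ↑T).foldl
    (fun r j => if (↑i : Int) ≠ j then r.set j.toNat (matchCount A ↑i j) else r) r).set i
    (-(tot2 A T i))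

theorem pv_rho2_len (A : List (List Int)) (T i : Nat) (r : List Int) :
    (rho2 A T i r).length = r.length := by
  unfold rho2
  rw [List.length_set, pv_rowFold_len]

theorem pv_matFold (P : Int → Prop) [DecidablePred P] (F : Int → Int) (i : Nat) :
    ∀ (js : List Int) (B : List (List Int)), i < B.length →
      js.foldl (fun B j => if P j then setE B ↑i j (F j) else B) B
        = B.set i (js.foldl (fun r j => if P j then r.set j.toNat (F j) else r) (B.getD i [])) := by
  intro js
  induction js with
  | nil => intro B hB; exact (pv_set_getD_self hB []).symm
  | cons j js ih =>
    intro B hB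
    by_cases h : P j
    · simp only [List.foldl_cons, if_pos h]
      have hset : setE B ↑i j (F j) = B.set i ((B.getD i []).set j.toNat (F j)) := by
        simp [setE, Int.toNat_natCast, PySem.List.pyGetD_natCast]
      rw [hset, ih _ (by simpa using hB)]
      rw [pv_getD_set_self hB, List.set_set]
    · simp only [List.foldl_cons, if_neg h]
      exact ih B hB

theorem pv_fillStep (A : List (List Int)) (T : Nat) (B : List (List Int)) (x : Int)
    (hx : 0 ≤ x) (hB : x.toNat < B.length) :
    fillStep A ↑T B x = B.set x.toNat (rho2 A T x.toNat (B.getD x.toNat [])) := by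
  obtain ⟨i, rfl⟩ : ∃ i : Nat, x = ↑i := ⟨x.toNat, (Int.toNat_of_nonneg hx).symm⟩
  rw [Int.toNat_natCast] at hB ⊢
  show setE ((PySem.List.pyRange 0 (↑T : Int)).foldl
      (fun (p : List (List Int) × Int) j =>
        if (↑i : Int) ≠ j then
          let inc := matchCount A ↑i j
          (setE p.1 ↑i j (matchCount A ↑i j), p.2 + inc)
        else p) (B, 0)).1 ↑i ↑i
    (-((PySem.List.pyRange 0 (↑T : Int)).foldl
      (fun (p : List (List Int) × Int) j =>
        if (↑i : Int) ≠ j then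
          let inc := matchCount A ↑i j
          (setE p.1 ↑i j (matchCount A ↑i j), p.2 + inc)
        else p) (B, 0)).2)
    = B.set i (rho2 A T i (B.getD i []))
  have hbody : (fun (p : List (List Int) × Int) j =>
      if (↑i : Int) ≠ j then
        let inc := matchCount A ↑i j
        (setE p.1 ↑i j (matchCount A ↑i j), p.2 + inc)
      else p)
      = (fun (p : List (List Int) × Int) j =>
        ((fun (B : List (List Int)) (j : Int) =>
            if (↑i : Int) ≠ j then setE B ↑i j (matchCount A ↑i j) else B) p.1 j,
         (fun (t : Int) (j : Int) =>
            if (↑i : Int) ≠ j then t + matchCount A ↑i j else t) p.2 j)) := by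
    funext p j
    by_cases h : (↑i : Int) ≠ j <;> simp [h]
  have hsplit : (PySem.List.pyRange 0 (↑T : Int)).foldl
      (fun (p : List (List Int) × Int) j =>
        if (↑i : Int) ≠ j then
          let inc := matchCount A ↑i j
          (setE p.1 ↑i j (matchCount A ↑i j), p.2 + inc)
        else p) (B, 0)
      = ((PySem.List.pyRange 0 (↑T : Int)).foldl
          (fun (B : List (List Int)) (j : Int) =>
            if (↑i : Int) ≠ j then setE B ↑i j (matchCount A ↑i j) else B) B,
         (PySem.List.pyRange 0 (↑T : Int)).foldl
          (fun (t : Int) (j : Int) =>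
            if (↑i : Int) ≠ j then t + matchCount A ↑i j else t) 0) := by
    rw [hbody]
    exact PySem.List.foldl_prod_mk
      (fun (B : List (List Int)) (j : Int) =>
        if (↑i : Int) ≠ j then setE B ↑i j (matchCount A ↑i j) else B)
      (fun (t : Int) (j : Int) =>
        if (↑i : Int) ≠ j then t + matchCount A ↑i j else t)
      (PySem.List.pyRange 0 (↑T : Int)) B 0
  simp only [hsplit]
  have htot : (PySem.List.pyRange 0 (↑T : Int)).foldl
      (fun (t : Int) (j : Int) => if (↑i : Int) ≠ j then t + matchCount A ↑i j else t) 0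
      = tot2 A T i := by
    have hb2 : (fun (t : Int) (j : Int) => if (↑i : Int) ≠ j then t + matchCount A ↑i j else t)
        = (fun (t : Int) (j : Int) => t + (if (↑i : Int) ≠ j then matchCount A ↑i j else 0)) := by
      funext t j; by_cases h : (↑i : Int) ≠ j <;> simp [h]
    rw [hb2, PySem.List.foldl_add, pv_sum_map_ite]
    unfold tot2
    rw [zero_add]
  rw [htot, pv_matFold _ _ _ _ _ hB]
  have hsetE : ∀ (X : List (List Int)) (v : Int),
      setE X ↑i ↑i v = X.set i ((X.getD i []).set i v) := by
    intro X v
    simp [setE, Int.toNat_natCast, PySem.List.pyGetD_natCast]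
  rw [hsetE]
  rw [pv_getD_set_self hB, List.set_set]
  unfold rho2
  rfl

-- ---------- A side: phase-3 step as a single row replacement ----------

def pvS3 (A : List (List Int)) (d : List Int) (i : Nat) : Int :=
  ((PySem.List.pyRange 0 (PySem.List.len A)).map
    (fun m => if pvVal A m ↑i ≠ 0 then -(pvVal A m ↑i) * PySem.List.pyGetD d m 0 else 0)).sum

def rho3 (A : List (List Int)) (d : List Int) (T i : Nat) (r : List Int) : List Int :=
  r.set T (r.getD T 0 + pvS3 A d i)

theorem pv_lastInner (A : List (List Int)) (d : List Int) (T i : Nat) :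
    ∀ (ms : List Int) (B : List (List Int)), i < B.length →
      (∀ k, k < B.length → (B.getD k []).length = T + 1) →
      ms.foldl (fun B m =>
          if PySem.List.pyGetD (PySem.List.pyGetD A m []) (↑i) 0 ≠ 0 then
            addE B ↑i (PySem.List.len (PySem.List.pyGetD B 0 []) - 1)
              (-(PySem.List.pyGetD (PySem.List.pyGetD A m []) (↑i) 0) * PySem.List.pyGetD d m 0)
          else B) B
        = B.set i ((B.getD i []).set T ((B.getD i []).getD T 0 +
            (ms.map (fun m => if pvVal A m ↑i ≠ 0
              then -(pvVal A m ↑i) * PySem.List.pyGetD d m 0 else 0)).sum)) := by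
  intro ms
  induction ms with
  | nil =>
    intro B hB hlen
    simp only [List.foldl_nil, List.map_nil, List.sum_nil, add_zero]
    rw [pv_set_getD_self (by rw [hlen i hB]; omega), pv_set_getD_self hB]
  | cons m ms ih =>
    intro B hB hlen
    have h0 : 0 < B.length := lt_of_le_of_lt (Nat.zero_le i) hB
    have hB0 : PySem.List.pyGetD B 0 [] = B.getD 0 [] := by
      have := PySem.List.pyGetD_natCast B 0 []
      simpa using this
    have hK : PySem.List.len (PySem.List.pyGetD B 0 []) - 1 = (↑T : Int) := by
      rw [hB0]
      have hlb : PySem.List.len (B.getD 0 []) = ((B.getD 0 []).length : Int) := by simp [pysem]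
      rw [hlb, hlen 0 h0]
      push_cast
      ring
    by_cases h : pvVal A m ↑i ≠ 0
    · have h' : PySem.List.pyGetD (PySem.List.pyGetD A m []) (↑i : Int) 0 ≠ 0 := h
      simp only [List.foldl_cons, if_pos h']
      rw [hK]
      have haddE : addE B ↑i ↑T
            (-(PySem.List.pyGetD (PySem.List.pyGetD A m []) (↑i : Int) 0) * PySem.List.pyGetD d m 0)
          = B.set i ((B.getD i []).set T ((B.getD i []).getD T 0 +
              -(PySem.List.pyGetD (PySem.List.pyGetD A m []) (↑i : Int) 0) * PySem.List.pyGetD d m 0)) := by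
        simp [addE, setE, Int.toNat_natCast, PySem.List.pyGetD_natCast]
      rw [haddE]
      set v : Int := -(PySem.List.pyGetD (PySem.List.pyGetD A m []) (↑i : Int) 0) * PySem.List.pyGetD d m 0 with hv
      have hB' : i < (B.set i ((B.getD i []).set T ((B.getD i []).getD T 0 + v))).length := by
        simpa using hB
      have hlen' : ∀ k, k < (B.set i ((B.getD i []).set T ((B.getD i []).getD T 0 + v))).length →
          (((B.set i ((B.getD i []).set T ((B.getD i []).getD T 0 + v))).getD k []).length = T + 1) := by
        intro k hk
        rw [List.length_set] at hk
        by_cases hki : i = k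
        · subst hki
          rw [pv_getD_set_self hB, List.length_set, hlen i hB]
        · rw [pv_getD_set_ne _ hki, hlen k hk]
      rw [ih _ hB' hlen']
      rw [pv_getD_set_self hB, List.set_set]
      rw [pv_getD_set_self (by rw [hlen i hB]; omega), List.set_set]
      have heq : (B.getD i []).getD T 0 + v
          + (ms.map (fun m => if pvVal A m ↑i ≠ 0
              then -(pvVal A m ↑i) * PySem.List.pyGetD d m 0 else 0)).sum
          = (B.getD i []).getD T 0 +
            ((m :: ms).map (fun m => if pvVal A m ↑i ≠ 0
              then -(pvVal A m ↑i) * PySem.List.pyGetD d m 0 else 0)).sum := by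
        simp only [List.map_cons, List.sum_cons, if_pos h]
        rw [hv]
        unfold pvVal
        ring
      rw [heq]
    · have h' : ¬ PySem.List.pyGetD (PySem.List.pyGetD A m []) (↑i : Int) 0 ≠ 0 := h
      simp only [List.foldl_cons, if_neg h']
      rw [ih _ hB hlen]
      simp only [List.map_cons, List.sum_cons, if_neg h, zero_add]

theorem pv_lastStep (A : List (List Int)) (d : List Int) (T : Nat) (B : List (List Int))
    (x : Int) (hx : 0 ≤ x) (hB : x.toNat < B.length)
    (hlen : ∀ k, k < B.length → (B.getD k []).length = T + 1) :
    lastStep A d B x = B.set x.toNat (rho3 A d T x.toNat (B.getD x.toNat [])) := by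
  obtain ⟨i, rfl⟩ : ∃ i : Nat, x = ↑i := ⟨x.toNat, (Int.toNat_of_nonneg hx).symm⟩
  rw [Int.toNat_natCast] at hB ⊢
  unfold lastStep rho3 pvS3
  exact pv_lastInner A d T i _ B hB hlen

-- ---------- A side: the outer row fold ----------

theorem pv_outer (step : List (List Int) → Int → List (List Int))
    (rho : Nat → List Int → List Int) (T : Nat)
    (hstep : ∀ (B : List (List Int)) (x : Int), 0 ≤ x → x.toNat < B.length →
      (∀ k, k < B.length → (B.getD k []).length = T + 1) →
      step B x = B.set x.toNat (rho x.toNat (B.getD x.toNat [])))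
    (hrho : ∀ i r, (rho i r).length = r.length) :
    ∀ (js : List Int) (B : List (List Int)), js.Nodup →
      (∀ x ∈ js, 0 ≤ x ∧ x.toNat < B.length) →
      (∀ k, k < B.length → (B.getD k []).length = T + 1) →
      (js.foldl step B).length = B.length ∧
      ∀ k : Nat, (js.foldl step B).getD k [] =
        if (↑k : Int) ∈ js then rho k (B.getD k []) else B.getD k [] := by
  intro js
  induction js with
  | nil => intro B _ _ _; exact ⟨rfl, fun k => by simp⟩
  | cons x js ih =>
    intro B hnd hbd hlen
    obtain ⟨hx0, hxlt⟩ := hbd x List.mem_cons_self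
    obtain ⟨i, rfl⟩ : ∃ i : Nat, x = ↑i := ⟨x.toNat, (Int.toNat_of_nonneg hx0).symm⟩
    rw [Int.toNat_natCast] at hxlt
    have hni : (↑i : Int) ∉ js := (List.nodup_cons.mp hnd).1
    simp only [List.foldl_cons]
    rw [hstep B ↑i (Int.natCast_nonneg i) (by simpa using hxlt) hlen]
    rw [Int.toNat_natCast]
    have hlenB' : (B.set i (rho i (B.getD i []))).length = B.length := List.length_set
    have hlen' : ∀ k, k < (B.set i (rho i (B.getD i []))).length →
        ((B.set i (rho i (B.getD i []))).getD k []).length = T + 1 := by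
      intro k hk
      rw [hlenB'] at hk
      by_cases hki : i = k
      · subst hki
        rw [pv_getD_set_self hxlt, hrho, hlen i hxlt]
      · rw [pv_getD_set_ne _ hki]
        exact hlen k hk
    have hbd' : ∀ y ∈ js, 0 ≤ y ∧ y.toNat < (B.set i (rho i (B.getD i []))).length := by
      intro y hy; rw [hlenB']; exact hbd y (List.mem_cons_of_mem _ hy)
    obtain ⟨hl, hg⟩ := ih (B.set i (rho i (B.getD i []))) (List.Nodup.of_cons hnd) hbd' hlen'
    refine ⟨by rw [hl, hlenB'], fun k => ?_⟩
    rw [hg k]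
    by_cases hk : (↑k : Int) ∈ js
    · have hki : i ≠ k := by
        rintro rfl
        exact hni hk
      rw [if_pos hk, if_pos (List.mem_cons_of_mem _ hk)]
      rw [pv_getD_set_ne _ hki]
    · by_cases hki : k = i
      · subst hki
        rw [if_neg hk, if_pos List.mem_cons_self]
        rw [pv_getD_set_self hxlt]
      · rw [if_neg hk, if_neg (show ¬ ((↑k : Int) ∈ (↑i : Int) :: js) from by
          rw [List.mem_cons]
          rintro (hh | hh)
          · exact hki (by exact_mod_cast hh)
          · exact hk hh)]
        rw [pv_getD_set_ne _ (Ne.symm hki)]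

-- ---------- bridges between the two sides ----------

theorem pv_mc_eq_pairAcc (A : List (List Int)) (T : Nat) {i j : Nat}
    (hi : i < T) (hj : j < T) (hne : j ≠ i) :
    matchCount A ↑i ↑j = pairAcc A ↑T A.length ↑i ↑j := by
  unfold matchCount pairAcc
  have hlenA : PySem.List.len A = ((A.length : Nat) : Int) := by simp [pysem]
  rw [hlenA, PySem.List.pyRange_zero_natCast, List.foldl_map]
  have hcongr : ∀ (c : Int), ∀ m ∈ List.range A.length,
      (if PySem.List.pyGetD (PySem.List.pyGetD A ↑m []) ↑i 0 ≠ 0 ∧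
          PySem.List.pyGetD (PySem.List.pyGetD A ↑m []) ↑j 0 ≠ 0 then c + 1 else c)
        = (if (fun (m : Nat) => decide (pvQ A ↑T m ↑i ∧ pvQ A ↑T m ↑j ∧ (↑j : Int) ≠ ↑i)) m = true
            then c + 1 else c) := by
    intro c m _
    have hiff : (PySem.List.pyGetD (PySem.List.pyGetD A ↑m []) ↑i 0 ≠ 0 ∧
        PySem.List.pyGetD (PySem.List.pyGetD A ↑m []) ↑j 0 ≠ 0)
        ↔ (pvQ A ↑T m ↑i ∧ pvQ A ↑T m ↑j ∧ (↑j : Int) ≠ ↑i) := by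
      unfold pvQ pvVal
      constructor
      · rintro ⟨h1, h2⟩
        refine ⟨⟨Int.natCast_nonneg i, by exact_mod_cast hi, h1⟩,
               ⟨Int.natCast_nonneg j, by exact_mod_cast hj, h2⟩, ?_⟩
        exact_mod_cast hne
      · rintro ⟨⟨_, _, h1⟩, ⟨_, _, h2⟩, _⟩
        exact ⟨h1, h2⟩
    by_cases h : PySem.List.pyGetD (PySem.List.pyGetD A ↑m []) ↑i 0 ≠ 0 ∧
        PySem.List.pyGetD (PySem.List.pyGetD A ↑m []) ↑j 0 ≠ 0
    · rw [if_pos h, if_pos (by simp only [decide_eq_true_eq]; exact hiff.mp h)]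
    · rw [if_neg h, if_neg (by simp only [decide_eq_true_eq]; exact hiff.not.mp h)]
  rw [PySem.List.foldl_congr_mem _ _ _ _ hcongr]
  rw [PySem.List.foldl_count_if]
  simp

theorem pv_filter_cast (T i : Nat) (f : Int → Int) :
    ((((List.range T).map (fun (k : Nat) => (↑k : Int))).filter
        (fun j => decide (j ≠ (↑i : Int)))).map f).sum
      = (((List.range T).filter (fun (j : Nat) => decide (j ≠ i))).map
          (fun (j : Nat) => f ↑j)).sum := by
  rw [List.filter_map, List.map_map]
  have h : List.filter ((fun j => decide (j ≠ (↑i : Int))) ∘ (fun (k : Nat) => (↑k : Int)))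
      (List.range T) = List.filter (fun (j : Nat) => decide (j ≠ i)) (List.range T) := by
    apply List.filter_congr
    intro x _
    simp [Function.comp]
  rw [h]
  rfl

theorem pv_tot2_eq (A : List (List Int)) (T i : Nat) (hi : i < T) :
    tot2 A T i = (((List.range T).filter (fun (j : Nat) => decide (j ≠ i))).map
      (fun (j : Nat) => pairAcc A ↑T A.length ↑i ↑j)).sum := by
  unfold tot2
  have hpred : ((PySem.List.pyRange 0 (↑T : Int)).filter (fun j => decide ((↑i : Int) ≠ j)))
      = ((PySem.List.pyRange 0 (↑T : Int)).filter (fun j => decide (j ≠ (↑i : Int)))) := by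
    apply List.filter_congr
    intro x _
    exact decide_eq_decide.mpr ⟨Ne.symm, Ne.symm⟩
  rw [hpred, PySem.List.pyRange_zero_natCast, pv_filter_cast T i (fun j => matchCount A ↑i j)]
  refine congrArg List.sum (List.map_congr_left ?_)
  intro j hj
  have hjr := List.mem_filter.mp hj
  have hjT : j < T := List.mem_range.mp hjr.1
  have hjne : j ≠ i := by simpa using hjr.2
  exact pv_mc_eq_pairAcc A T hi hjT hjne

theorem pv_S3_eq (A : List (List Int)) (d : List Int) (T i : Nat) (hi : i < T) :
    pvS3 A d i = colAcc A d ↑T A.length ↑i := by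
  unfold pvS3 colAcc
  have hlenA : PySem.List.len A = ((A.length : Nat) : Int) := by simp [pysem]
  rw [hlenA, PySem.List.pyRange_zero_natCast, List.map_map]
  refine congrArg List.sum (List.map_congr_left ?_)
  intro m _
  simp only [Function.comp]
  by_cases h : pvVal A ↑m ↑i ≠ 0
  · have hq : pvQ A ↑T m ↑i := ⟨Int.natCast_nonneg i, by exact_mod_cast hi, h⟩
    rw [if_pos h, if_pos hq]
    ring
  · have hq : ¬ pvQ A ↑T m ↑i := by
      unfold pvQ
      intro hh
      exact h hh.2.2
    rw [if_neg h, if_neg hq]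

-- ---------- A side: assembled ----------

theorem pv_rho2_getD (A : List (List Int)) (T i : Nat) (hi : i < T) (j : Nat) (hj : j ≤ T) :
    (rho2 A T i (List.replicate (T + 1) (0 : Int))).getD j 0 =
      if j = i then -(tot2 A T i)
      else if j < T then matchCount A ↑i ↑j else 0 := by
  unfold rho2
  have hfl : ((PySem.List.pyRange 0 (↑T : Int)).foldl
      (fun r j => if (↑i : Int) ≠ j then r.set j.toNat (matchCount A ↑i j) else r)
      (List.replicate (T + 1) (0 : Int)))
      = ((List.range T).foldl
        (fun r (j : Nat) => if j ≠ i then r.set j (matchCount A ↑i ↑j) else r)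
        (List.replicate (T + 1) (0 : Int))) := by
    rw [PySem.List.pyRange_zero_natCast, List.foldl_map]
    apply PySem.List.foldl_congr_mem
    intro r k _
    by_cases h : k = i
    · subst h; simp
    · rw [if_pos (show (↑i : Int) ≠ ↑k from by
          intro hh
          exact h (by exact_mod_cast hh.symm)), if_pos h,
        Int.toNat_natCast]
  rw [hfl]
  have hflen : ((List.range T).foldl
      (fun r (j : Nat) => if j ≠ i then r.set j (matchCount A ↑i ↑j) else r)
      (List.replicate (T + 1) (0 : Int))).length = T + 1 := by
    rw [pv_natFold_len, List.length_replicate]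
  by_cases hji : j = i
  · subst hji
    rw [pv_getD_set_self (by rw [hflen]; omega), if_pos rfl]
  · rw [pv_getD_set_ne _ (fun hh => hji hh.symm)]
    rw [pv_rowFold_getD _ _ T _ (by simp) j]
    rw [if_neg hji]
    by_cases hjT : j < T
    · rw [if_pos ⟨hjT, hji⟩, if_pos hjT]
    · rw [if_neg (by omega), if_neg hjT, List.getD_replicate _ (by omega)]

theorem aSide (A : List (List Int)) (d : List Int) : computeB A d = specMat A d := by
  set T : Nat := (A.getD 0 []).length with hT
  have hteams : PySem.List.len (PySem.List.pyGetD A 0 []) = (↑T : Int) := by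
    have h1 : PySem.List.pyGetD A 0 [] = A.getD 0 [] := by
      have := PySem.List.pyGetD_natCast A 0 []
      simpa using this
    rw [h1]
    simp [pysem, hT]
  show computeB_last A d (PySem.List.len (PySem.List.pyGetD A 0 []))
      (computeB_fill A (PySem.List.len (PySem.List.pyGetD A 0 []))
        (computeB_zero (PySem.List.len (PySem.List.pyGetD A 0 [])))) = specMat A d
  rw [hteams, pv_zeroMat]
  unfold computeB_fill computeB_last
  -- phase 2
  obtain ⟨hM1len, hM1get⟩ := pv_outer (fillStep A ↑T) (rho2 A T) T
    (fun B x h0 hxl _ => pv_fillStep A T B x h0 hxl)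
    (fun i r => pv_rho2_len A T i r)
    (PySem.List.pyRange 0 (↑T : Int))
    (List.replicate T (List.replicate (T + 1) (0 : Int)))
    (pv_pyRange_nodup T)
    (by
      intro x hxmem
      have := PySem.List.mem_pyRange_one.mp hxmem
      rw [List.length_replicate]
      omega)
    (by
      intro k hk
      rw [List.length_replicate] at hk
      rw [List.getD_replicate _ hk, List.length_replicate])
  rw [List.length_replicate] at hM1len
  have hM1row : ∀ k, k < T →
      ((PySem.List.pyRange 0 (↑T : Int)).foldl (fillStep A ↑T)
        (List.replicate T (List.replicate (T + 1) (0 : Int)))).getD k []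
      = rho2 A T k (List.replicate (T + 1) (0 : Int)) := by
    intro k hk
    rw [hM1get k, if_pos ((pv_mem_pyRange T k).mpr hk), List.getD_replicate _ hk]
  have hM1inv : ∀ k, k < ((PySem.List.pyRange 0 (↑T : Int)).foldl (fillStep A ↑T)
      (List.replicate T (List.replicate (T + 1) (0 : Int)))).length →
      (((PySem.List.pyRange 0 (↑T : Int)).foldl (fillStep A ↑T)
        (List.replicate T (List.replicate (T + 1) (0 : Int)))).getD k []).length = T + 1 := by
    intro k hk
    rw [hM1len] at hk
    rw [hM1row k hk, pv_rho2_len, List.length_replicate]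
  -- phase 3
  obtain ⟨hM2len, hM2get⟩ := pv_outer (lastStep A d) (rho3 A d T) T
    (fun B x h0 hxl hl => pv_lastStep A d T B x h0 hxl hl)
    (fun i r => by unfold rho3; exact List.length_set)
    (PySem.List.pyRange 0 (↑T : Int))
    ((PySem.List.pyRange 0 (↑T : Int)).foldl (fillStep A ↑T)
      (List.replicate T (List.replicate (T + 1) (0 : Int))))
    (pv_pyRange_nodup T)
    (by
      intro x hxmem
      have := PySem.List.mem_pyRange_one.mp hxmem
      rw [hM1len]
      omega)
    hM1inv
  -- final extensionality
  apply List.ext_getElem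
  · rw [hM2len, hM1len]
    unfold specMat
    simp only [← hT]
    rw [List.length_map, List.length_range]
  · intro k h1 h2
    have hkT : k < T := by rw [hM2len, hM1len] at h1; exact h1
    have hrow : ((PySem.List.pyRange 0 (↑T : Int)).foldl (lastStep A d)
        ((PySem.List.pyRange 0 (↑T : Int)).foldl (fillStep A ↑T)
          (List.replicate T (List.replicate (T + 1) (0 : Int)))))[k]
        = rho3 A d T k (rho2 A T k (List.replicate (T + 1) (0 : Int))) := by
      rw [← List.getD_eq_getElem _ [] h1, hM2get k, if_pos ((pv_mem_pyRange T k).mpr hkT),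
        hM1row k hkT]
    have hspec : (specMat A d)[k]'h2 =
        ((List.range T).map (fun (j : Nat) =>
          if j = k then
            -((((List.range T).filter (fun (j : Nat) => decide (j ≠ k))).map
                (fun (j : Nat) => pairAcc A ↑T A.length ↑k ↑j)).sum)
          else pairAcc A ↑T A.length ↑k ↑j))
        ++ [colAcc A d ↑T A.length ↑k] := by
      unfold specMat
      simp only [← hT]
      rw [List.getElem_map, List.getElem_range]
    rw [hrow, hspec]
    -- row extensionality
    have hr2len : (rho2 A T k (List.replicate (T + 1) (0 : Int))).length = T + 1 := by
      rw [pv_rho2_len, List.length_replicate]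
    apply List.ext_getElem
    · unfold rho3
      rw [List.length_set, hr2len]
      simp
    · intro j hj1 hj2
      have hjT1 : j < T + 1 := by
        unfold rho3 at hj1
        rw [List.length_set, hr2len] at hj1
        exact hj1
      rw [← List.getD_eq_getElem _ 0 hj1]
      unfold rho3
      by_cases hjT : j = T
      · subst hjT
        rw [pv_getD_set_self (by rw [hr2len]; omega)]
        rw [pv_rho2_getD A T k hkT T le_rfl]
        rw [if_neg (by omega), if_neg (by omega), zero_add]
        rw [List.getElem_append_right (by simp)]
        simp [pv_S3_eq A d T k hkT]
      · have hjT' : j < T := by omega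
        rw [pv_getD_set_ne _ (by omega)]
        rw [pv_rho2_getD A T k hkT j (by omega)]
        rw [List.getElem_append_left (by simpa using hjT')]
        rw [List.getElem_map, List.getElem_range]
        by_cases hjk : j = k
        · rw [if_pos hjk, if_pos hjk, pv_tot2_eq A T k hkT]
        · rw [if_neg hjk, if_pos hjT', if_neg hjk]
          exact pv_mc_eq_pairAcc A T hkT hjT' hjk

-- ---------- B side ----------

def pvNz (A : List (List Int)) (T : Int) (m : Int) : List Int :=
  (PySem.List.pyRange 0 T).filter
    (fun i => decide (PySem.List.pyGetD (PySem.List.pyGetD A m []) i 0 ≠ 0))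

theorem pv_nz_nodup (A : List (List Int)) (T : Nat) (m : Int) : (pvNz A ↑T m).Nodup := by
  unfold pvNz
  exact List.Nodup.filter _ (pv_pyRange_nodup T)

theorem pv_mem_nz (A : List (List Int)) (T : Nat) (m : Nat) (x : Int) :
    x ∈ pvNz A ↑T ↑m ↔ pvQ A ↑T m x := by
  unfold pvNz pvQ pvVal
  rw [List.mem_filter, PySem.List.mem_pyRange_one]
  simp [and_assoc]

theorem pv_step_eq (A : List (List Int)) (d : List Int) (T : Int)
    (st : PySem.Dict (Int × Int) Int × PySem.Dict Int Int) (m : Int) :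
    altStep A d T st m
      = ((pvNz A T m).foldl (fun p e => altPairUpd (pvNz A T m) e p) st.1,
         (pvNz A T m).foldl (fun c e => c.insert e (c.getD e 0 -
           PySem.List.pyGetD (PySem.List.pyGetD A m []) e 0 * PySem.List.pyGetD d m 0)) st.2) := by
  obtain ⟨p, c⟩ := st
  show (pvNz A T m).foldl
      (fun st i =>
        (altPairUpd (pvNz A T m) i st.1,
         st.2.insert i (st.2.getD i 0 -
           PySem.List.pyGetD (PySem.List.pyGetD A m []) i 0 * PySem.List.pyGetD d m 0))) (p, c)
    = _
  exact PySem.List.foldl_prod_mk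
    (fun p e => altPairUpd (pvNz A T m) e p)
    (fun c e => c.insert e (c.getD e 0 -
      PySem.List.pyGetD (PySem.List.pyGetD A m []) e 0 * PySem.List.pyGetD d m 0))
    (pvNz A T m) p c

theorem pv_innerPair (i : Int) (a b : Int) :
    ∀ (js : List Int) (p : PySem.Dict (Int × Int) Int), js.Nodup →
      (altPairUpd js i p).getD (a, b) 0
        = p.getD (a, b) 0 + (if a = i ∧ b ∈ js ∧ b ≠ i then 1 else 0) := by
  intro js
  induction js with
  | nil => intro p _; simp [altPairUpd]
  | cons j js ih =>
    intro p hnd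
    have hjn : j ∉ js := (List.nodup_cons.mp hnd).1
    unfold altPairUpd
    rw [List.foldl_cons]
    by_cases hj : j ≠ i
    · rw [if_pos hj]
      have hrec := ih (p.insert (i, j) (p.getD (i, j) 0 + 1)) (List.Nodup.of_cons hnd)
      unfold altPairUpd at hrec
      rw [hrec]
      by_cases hab : a = i ∧ b = j
      · obtain ⟨ha, hb⟩ := hab
        subst ha; subst hb
        rw [PySem.Dict.getD_insert_self]
        rw [if_neg (show ¬ (a = a ∧ b ∈ js ∧ b ≠ a) from fun hh => hjn hh.2.1)]
        rw [if_pos (show (a = a ∧ b ∈ b :: js ∧ b ≠ a) from ⟨rfl, List.mem_cons_self, hj⟩)]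
        ring
      · rw [PySem.Dict.getD_insert_of_ne _ _ _ (show (a, b) ≠ (i, j) from by
          intro hh
          injection hh with hh1 hh2
          exact hab ⟨hh1, hh2⟩)]
        congr 1
        have hiff : (a = i ∧ b ∈ js ∧ b ≠ i) ↔ (a = i ∧ b ∈ j :: js ∧ b ≠ i) := by
          constructor
          · rintro ⟨h1, h2, h3⟩; exact ⟨h1, List.mem_cons_of_mem _ h2, h3⟩
          · rintro ⟨h1, h2, h3⟩
            rcases List.mem_cons.mp h2 with hbj | hbj
            · exact absurd ⟨h1, hbj⟩ hab
            · exact ⟨h1, hbj, h3⟩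
        by_cases hc : a = i ∧ b ∈ js ∧ b ≠ i
        · rw [if_pos hc, if_pos (hiff.mp hc)]
        · rw [if_neg hc, if_neg (fun hh => hc (hiff.mpr hh))]
    · rw [if_neg hj]
      have hji : j = i := by omega
      subst hji
      have hrec := ih p (List.Nodup.of_cons hnd)
      unfold altPairUpd at hrec
      rw [hrec]
      congr 1
      have hiff : (a = j ∧ b ∈ js ∧ b ≠ j) ↔ (a = j ∧ b ∈ j :: js ∧ b ≠ j) := by
        constructor
        · rintro ⟨h1, h2, h3⟩; exact ⟨h1, List.mem_cons_of_mem _ h2, h3⟩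
        · rintro ⟨h1, h2, h3⟩
          rcases List.mem_cons.mp h2 with hbj | hbj
          · exact absurd hbj h3
          · exact ⟨h1, hbj, h3⟩
      by_cases hc : a = j ∧ b ∈ js ∧ b ≠ j
      · rw [if_pos hc, if_pos (hiff.mp hc)]
      · rw [if_neg hc, if_neg (fun hh => hc (hiff.mpr hh))]

theorem pv_outerPair (nz : List Int) (a b : Int) (hnz : nz.Nodup) :
    ∀ (is : List Int) (p : PySem.Dict (Int × Int) Int), is.Nodup →
      (is.foldl (fun p i0 => altPairUpd nz i0 p) p).getD (a, b) 0
        = p.getD (a, b) 0 + (if a ∈ is ∧ b ∈ nz ∧ b ≠ a then 1 else 0) := by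
  intro is
  induction is with
  | nil => intro p _; simp
  | cons i0 is ih =>
    intro p hnd
    have hni : i0 ∉ is := (List.nodup_cons.mp hnd).1
    rw [List.foldl_cons, ih _ (List.Nodup.of_cons hnd)]
    rw [pv_innerPair i0 a b nz p hnz]
    by_cases ha : a = i0
    · subst ha
      rw [if_neg (show ¬ (a ∈ is ∧ b ∈ nz ∧ b ≠ a) from fun hh => hni hh.1)]
      by_cases hX : b ∈ nz ∧ b ≠ a
      · rw [if_pos (show a = a ∧ b ∈ nz ∧ b ≠ a from ⟨rfl, hX.1, hX.2⟩),
            if_pos (show a ∈ a :: is ∧ b ∈ nz ∧ b ≠ a from ⟨List.mem_cons_self, hX⟩)]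
        ring
      · rw [if_neg (show ¬ (a = a ∧ b ∈ nz ∧ b ≠ a) from fun hh => hX ⟨hh.2.1, hh.2.2⟩),
            if_neg (show ¬ (a ∈ a :: is ∧ b ∈ nz ∧ b ≠ a) from fun hh => hX ⟨hh.2.1, hh.2.2⟩)]
        ring
    · rw [if_neg (show ¬ (a = i0 ∧ b ∈ nz ∧ b ≠ i0) from fun hh => ha hh.1)]
      by_cases hc : a ∈ is ∧ b ∈ nz ∧ b ≠ a
      · rw [if_pos hc,
            if_pos (show a ∈ i0 :: is ∧ b ∈ nz ∧ b ≠ a from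
              ⟨List.mem_cons_of_mem _ hc.1, hc.2⟩)]
        ring
      · rw [if_neg hc, if_neg (show ¬ (a ∈ i0 :: is ∧ b ∈ nz ∧ b ≠ a) from by
          rintro ⟨h1, h2⟩
          rcases List.mem_cons.mp h1 with hh | hh
          · exact ha hh
          · exact hc ⟨hh, h2⟩)]
        ring

theorem pv_colFold (G : Int → Int) (i : Int) :
    ∀ (is : List Int) (c : PySem.Dict Int Int), is.Nodup →
      (is.foldl (fun c i0 => c.insert i0 (c.getD i0 0 - G i0)) c).getD i 0
        = c.getD i 0 - (if i ∈ is then G i else 0) := by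
  intro is
  induction is with
  | nil => intro c _; simp
  | cons i0 is ih =>
    intro c hnd
    have hni : i0 ∉ is := (List.nodup_cons.mp hnd).1
    rw [List.foldl_cons, ih _ (List.Nodup.of_cons hnd)]
    by_cases hi : i = i0
    · subst hi
      rw [PySem.Dict.getD_insert_self]
      rw [if_neg hni, if_pos List.mem_cons_self]
      ring
    · rw [PySem.Dict.getD_insert_of_ne _ _ _ hi]
      by_cases hc : i ∈ is
      · rw [if_pos hc, if_pos (List.mem_cons_of_mem _ hc)]
      · rw [if_neg hc, if_neg (show ¬ i ∈ i0 :: is from by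
          intro hh
          rcases List.mem_cons.mp hh with h1 | h1
          · exact hi h1
          · exact hc h1)]

theorem pv_pairAcc_succ (A : List (List Int)) (T : Int) (n : Nat) (a b : Int) :
    pairAcc A T (n + 1) a b
      = pairAcc A T n a b + (if pvQ A T n a ∧ pvQ A T n b ∧ b ≠ a then 1 else 0) := by
  unfold pairAcc
  rw [List.range_succ, List.countP_append]
  by_cases h : pvQ A T n a ∧ pvQ A T n b ∧ b ≠ a <;> simp [h]

theorem pv_colAcc_succ (A : List (List Int)) (d : List Int) (T : Int) (n : Nat) (i : Int) :
    colAcc A d T (n + 1) i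
      = colAcc A d T n i
        + (if pvQ A T n i then -(pvVal A ↑n i * PySem.List.pyGetD d ↑n 0) else 0) := by
  unfold colAcc
  rw [List.range_succ, List.map_append, List.sum_append]
  simp

theorem pv_dicts (A : List (List Int)) (d : List Int) (T : Nat) :
    ∀ n : Nat,
    (∀ a b : Int,
      ((PySem.List.pyRange 0 ((n : Nat) : Int)).foldl (altStep A d ↑T)
        (PySem.Dict.empty, PySem.Dict.empty)).1.getD (a, b) 0 = pairAcc A ↑T n a b)
    ∧ (∀ i : Int,
      ((PySem.List.pyRange 0 ((n : Nat) : Int)).foldl (altStep A d ↑T)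
        (PySem.Dict.empty, PySem.Dict.empty)).2.getD i 0 = colAcc A d ↑T n i) := by
  intro n
  induction n with
  | zero =>
    constructor
    · intro a b
      show (PySem.Dict.empty : PySem.Dict (Int × Int) Int).getD (a, b) 0 = pairAcc A ↑T 0 a b
      simp [pairAcc, PySem.Dict.getD_empty]
    · intro i
      show (PySem.Dict.empty : PySem.Dict Int Int).getD i 0 = colAcc A d ↑T 0 i
      simp [colAcc, PySem.Dict.getD_empty]
  | succ n ih =>
    have hsplit : PySem.List.pyRange 0 ((n + 1 : Nat) : Int)
        = PySem.List.pyRange 0 ((n : Nat) : Int) ++ [((n : Nat) : Int)] := by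
      have h1 : ((n + 1 : Nat) : Int) = ((n : Nat) : Int) + 1 := by push_cast; ring
      rw [h1, PySem.List.pyRange_one_succ_right (Int.natCast_nonneg n)]
    rw [hsplit, List.foldl_append]
    simp only [List.foldl_cons, List.foldl_nil]
    rw [pv_step_eq]
    constructor
    · intro a b
      rw [pv_outerPair _ a b (pv_nz_nodup A T ↑n) _ _ (pv_nz_nodup A T ↑n)]
      rw [ih.1 a b, pv_pairAcc_succ]
      congr 1
      by_cases hc : pvQ A ↑T n a ∧ pvQ A ↑T n b ∧ b ≠ a
      · rw [if_pos ⟨(pv_mem_nz A T n a).mpr hc.1, (pv_mem_nz A T n b).mpr hc.2.1, hc.2.2⟩,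
          if_pos hc]
      · rw [if_neg (by
          rintro ⟨h1, h2, h3⟩
          exact hc ⟨(pv_mem_nz A T n a).mp h1, (pv_mem_nz A T n b).mp h2, h3⟩), if_neg hc]
    · intro i
      rw [pv_colFold (fun e => PySem.List.pyGetD (PySem.List.pyGetD A ↑n []) e 0
          * PySem.List.pyGetD d ↑n 0) i _ _ (pv_nz_nodup A T ↑n)]
      rw [ih.2 i, pv_colAcc_succ]
      by_cases hc : pvQ A ↑T n i
      · rw [if_pos ((pv_mem_nz A T n i).mpr hc), if_pos hc]
        unfold pvVal
        ring
      · rw [if_neg (fun hh => hc ((pv_mem_nz A T n i).mp hh)), if_neg hc]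
        ring

theorem altSide (A : List (List Int)) (d : List Int) : computeB_alt A d = specMat A d := by
  set T : Nat := (A.getD 0 []).length with hT
  have hteams : PySem.List.len (PySem.List.pyGetD A 0 []) = (↑T : Int) := by
    have h1 : PySem.List.pyGetD A 0 [] = A.getD 0 [] := by
      have := PySem.List.pyGetD_natCast A 0 []
      simpa using this
    rw [h1]
    simp [pysem, hT]
  have hlenA : PySem.List.len A = ((A.length : Nat) : Int) := by simp [pysem]
  simp only [computeB_alt]
  rw [hteams, hlenA]
  have hpair := (pv_dicts A d T A.length).1
  have hcol := (pv_dicts A d T A.length).2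
  simp only [hpair, hcol]
  rw [PySem.List.pyRange_zero_natCast, List.map_map]
  unfold specMat
  simp only [← hT]
  apply List.map_congr_left
  intro i hi
  simp only [Function.comp]
  congr 1
  rw [List.map_map]
  apply List.map_congr_left
  intro j hj
  simp only [Function.comp]
  by_cases hij : j = i
  · subst hij
    rw [if_pos (show (↑j : Int) = ↑j from rfl), if_pos (show j = j from rfl)]
    rw [pv_filter_cast T j (fun x => pairAcc A ↑T A.length ↑j x)]
  · rw [if_neg (show ¬ ((↑j : Int) = ↑i) from by exact_mod_cast hij), if_neg hij]

-- ===== VERDICT (by name: the statement is the Claim_ definition above) =====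
theorem computeB_spec : Claim_equal_computeB := by
  intro A d _ _
  unfold Spec_computeB
  rw [aSide, altSide]
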